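-- pv_equiv track=rewrite | github.com/a3fpro-lab/Vireon-Mensa-Fractal-Engine | vireon_mensa_solver.py | _solve_numeric
-- ===== SOURCE A (Python) =====
-- def _solve_numeric(test_id: int, question_idx: int):
--     """
--     Recover the hidden term in the numeric sequence (hard mode).
--     Mirrors generate_numeric_question().
--     """
--     local = question_idx  # 1..15
--     length = 7
--
--     base = (3 * test_id + 5 * local) % 97 + 10
--     alpha = (2 * test_id + local) % 11 + 1   # linear
--     beta = (test_id + 3 * local) % 7 + 1     # quadratic
--     even_offset = (test_id * local) % 9
--     odd_offset = (test_id + local) % 9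
--
--     seq = []
--     for n in range(length):
--         k = n + 1
--         val = base + alpha * k + beta * (k * k)
--         if k % 2 == 0:
--             val += even_offset
--         else:
--             val += odd_offset
--         seq.append(val)
--
--     missing_pos = 2 + (local % 3)  # 2..4 (0-based)
--     return seq[missing_pos]
-- ===== SOURCE B (Python) =====
-- def _solve_numeric(test_id: int, question_idx: int):
--     # Closed form: index the hidden term directly instead of generating the sequence.
--     local = question_idx
--     k = 3 + (local % 3)  # missing_pos (2 + local%3, 0-based) + 1
--     val = ((3 * test_id + 5 * local) % 97 + 10          # base
--            + ((2 * test_id + local) % 11 + 1) * k       # alpha * k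
--            + ((test_id + 3 * local) % 7 + 1) * k * k)   # beta * k^2
--     if k % 2 == 0:
--         val += (test_id * local) % 9
--     else:
--         val += (test_id + local) % 9
--     return val
-- ===== Notes on version B (the rewrite author's own statement) =====
-- stated objective: simpler
-- what changed: B computes the requested term in closed form (k = 3 + local%3 plugged into the quadratic formula) instead of building the 7-element sequence in a loop and indexing it.
import Mathlib
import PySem

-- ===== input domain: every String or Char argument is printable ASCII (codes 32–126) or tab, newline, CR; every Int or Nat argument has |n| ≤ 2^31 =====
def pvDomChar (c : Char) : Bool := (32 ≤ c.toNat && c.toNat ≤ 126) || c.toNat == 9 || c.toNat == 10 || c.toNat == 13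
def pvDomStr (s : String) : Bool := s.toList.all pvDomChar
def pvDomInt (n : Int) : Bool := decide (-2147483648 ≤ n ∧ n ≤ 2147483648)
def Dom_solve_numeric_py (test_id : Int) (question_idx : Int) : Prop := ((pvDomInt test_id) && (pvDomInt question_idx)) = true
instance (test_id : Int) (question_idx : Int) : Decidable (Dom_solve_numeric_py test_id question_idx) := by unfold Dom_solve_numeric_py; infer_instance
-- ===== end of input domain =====

-- B replaces A's sequence-building loop by a closed-form evaluation at the requested index (simpler).

-- ===== PORT A =====
-- Literal port of _solve_numeric: build the 7-term sequence by a fold, then index it.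
-- seq[missing_pos] is always in range (missing_pos ∈ 2..4, length 7), so Python never
-- raises; the port uses pyGet? with a .getD 0 that is never taken.
def solve_numeric_py (test_id : Int) (question_idx : Int) : Int :=
  let loc := question_idx
  let base := PySem.Int.mod (3 * test_id + 5 * loc) 97 + 10
  let alpha := PySem.Int.mod (2 * test_id + loc) 11 + 1
  let beta := PySem.Int.mod (test_id + 3 * loc) 7 + 1
  let even_offset := PySem.Int.mod (test_id * loc) 9
  let odd_offset := PySem.Int.mod (test_id + loc) 9
  let seq : List Int := (PySem.List.pyRange 0 7 1).foldl (fun seq n =>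
    let k := n + 1
    let val := base + alpha * k + beta * (k * k)
    let val := if PySem.Int.mod k 2 = 0 then val + even_offset else val + odd_offset
    seq ++ [val]) []
  let missing_pos := 2 + PySem.Int.mod loc 3
  (PySem.List.pyGet? seq missing_pos).getD 0

-- ===== PORT B =====
def solve_numeric_py_alt (test_id : Int) (question_idx : Int) : Int :=
  let loc := question_idx
  let k := 3 + PySem.Int.mod loc 3
  let val := PySem.Int.mod (3 * test_id + 5 * loc) 97 + 10
    + (PySem.Int.mod (2 * test_id + loc) 11 + 1) * k
    + (PySem.Int.mod (test_id + 3 * loc) 7 + 1) * k * k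
  if PySem.Int.mod k 2 = 0 then val + PySem.Int.mod (test_id * loc) 9
  else val + PySem.Int.mod (test_id + loc) 9

-- ===== PRECONDITION & SPEC =====
def Spec_solve_numeric_py (test_id : Int) (question_idx : Int) (out : Int) : Prop := out = solve_numeric_py_alt test_id question_idx
instance (test_id : Int) (question_idx : Int) (out : Int) : Decidable (Spec_solve_numeric_py test_id question_idx out) := by unfold Spec_solve_numeric_py; infer_instance

-- ===== CLAIM (what is proved, stated in full; the proofs are below) =====
def Claim_equal_solve_numeric_py : Prop := ∀ (test_id : Int) (question_idx : Int), Dom_solve_numeric_py test_id question_idx → Spec_solve_numeric_py test_id question_idx (solve_numeric_py test_id question_idx)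

-- ===== LEMMAS AND PROOFS =====

-- ===== VERDICT (by name: the statement is the Claim_ definition above) =====
theorem solve_numeric_py_spec : Claim_equal_solve_numeric_py := by
  intro t q _
  have h0 : (0:Int) ≤ PySem.Int.mod q 3 := PySem.Int.mod_nonneg q (by norm_num)
  have h3 : PySem.Int.mod q 3 < 3 := PySem.Int.mod_lt q (by norm_num)
  unfold Spec_solve_numeric_py solve_numeric_py solve_numeric_py_alt
  have hrange : PySem.List.pyRange 0 7 1 = [0, 1, 2, 3, 4, 5, 6] := by decide
  have hr : PySem.Int.mod q 3 = 0 ∨ PySem.Int.mod q 3 = 1 ∨ PySem.Int.mod q 3 = 2 := by omega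
  rcases hr with h | h | h <;>
    simp only [h, hrange, List.foldl, List.nil_append, List.cons_append,
      (by decide : PySem.Int.mod (1:Int) 2 = 1), (by decide : PySem.Int.mod (2:Int) 2 = 0),
      (by decide : PySem.Int.mod (3:Int) 2 = 1), (by decide : PySem.Int.mod (4:Int) 2 = 0),
      (by decide : PySem.Int.mod (5:Int) 2 = 1), (by decide : PySem.Int.mod (6:Int) 2 = 0),
      (by decide : PySem.Int.mod (7:Int) 2 = 1)] <;>
    norm_num [PySem.List.pyGet?, PySem.List.pyIdx?, (by decide : Int.toNat 2 = 2), (by decide : Int.toNat 3 = 3), (by decide : Int.toNat 4 = 4)] <;>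
    ring
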